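-- pv_equiv track=rewrite | github.com/ludyw21/OpenGame_AutoPiano | meowauto/utils/exporters/key_notation.py | _midi_to_reg_deg
-- ===== SOURCE A (Python) =====
-- from typing import Dict, Iterable, List, Set, Tuple
--
-- def _midi_to_reg_deg(n: int) -> Tuple[str, str]:
--     """将 MIDI 音高映射为 (区间 L/M/H, 度数 '1'..'7')，按 C 大调白键就近规则。
--     - < C4: L（低音区）
--     - C4..B4: M（中音区）
--     - >= C5: H（高音区）
--     黑键就近映射到最近白键度数。
--     """
--     pc = n % 12
--     white_map = {0: '1', 2: '2', 4: '3', 5: '4', 7: '5', 9: '6', 11: '7'}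
--     if pc not in white_map:
--         for d in (1, -1, 2, -2):
--             cand = (pc + d) % 12
--             if cand in white_map:
--                 pc = cand
--                 break
--     deg = white_map.get(pc, '1')
--     if n < 60:
--         reg = 'L'
--     elif n <= 71:
--         reg = 'M'
--     else:
--         reg = 'H'
--     return reg, deg
-- ===== SOURCE B (Python) =====
-- from typing import Tuple
--
-- # degree for every pitch class 0..11: black keys already rounded to the nearest
-- # white key (upward on ties, matching just-intonation "nearest white" rule)
-- _DEG = {0: '1', 1: '2', 2: '2', 3: '3', 4: '3', 5: '4',
--         6: '5', 7: '5', 8: '6', 9: '6', 10: '7', 11: '7'}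
--
-- def _midi_to_reg_deg(n: int) -> Tuple[str, str]:
--     reg = 'L' if n < 60 else ('M' if n <= 71 else 'H')
--     return reg, _DEG[n % 12]
-- ===== Notes on version B (the rewrite author's own statement) =====
-- stated objective: simpler
-- what changed: The white-key dict plus the directional nearest-white-key search loop with fallback is replaced by one precomputed pitch-class-to-degree table (one entry per pitch class) and a single direct lookup on the pitch class; no loop, no break, no fallback.
import Mathlib
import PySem

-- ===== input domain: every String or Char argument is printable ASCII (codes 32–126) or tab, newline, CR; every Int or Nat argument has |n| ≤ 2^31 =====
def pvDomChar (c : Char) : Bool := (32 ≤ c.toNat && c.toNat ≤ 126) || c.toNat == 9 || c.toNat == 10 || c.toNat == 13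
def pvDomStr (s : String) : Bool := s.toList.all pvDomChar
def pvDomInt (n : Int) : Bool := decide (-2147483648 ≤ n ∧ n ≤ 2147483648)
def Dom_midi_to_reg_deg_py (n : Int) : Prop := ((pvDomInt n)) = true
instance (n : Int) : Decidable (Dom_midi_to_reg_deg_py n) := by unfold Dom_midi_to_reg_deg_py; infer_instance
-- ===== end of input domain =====

-- B replaces A's white-key dict + nearest-white-key search loop by one 12-entry
-- pitch-class → degree table and a direct lookup (objective: simpler).

-- ===== PORT A =====
def pvWhiteMap : PySem.Dict Int String :=
  PySem.Dict.ofList [(0, "1"), (2, "2"), (4, "3"), (5, "4"), (7, "5"), (9, "6"), (11, "7")]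

-- the 'for d in (1, -1, 2, -2): … break' loop: returns the updated pc, or pc unchanged if no break
def pvFindWhite : List Int → Int → Int
  | [], pc => pc
  | d :: ds, pc =>
      let cand := PySem.Int.mod (pc + d) 12
      if pvWhiteMap.contains cand then cand else pvFindWhite ds pc

def midi_to_reg_deg_py (n : Int) : String × String :=
  let pc0 := PySem.Int.mod n 12
  let pc := if ¬ pvWhiteMap.contains pc0 then pvFindWhite [1, -1, 2, -2] pc0 else pc0
  let deg := pvWhiteMap.getD pc "1"
  let reg := if n < 60 then "L" else if n ≤ 71 then "M" else "H"
  (reg, deg)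

-- ===== PORT B =====
def pvDegTable : PySem.Dict Int String :=
  PySem.Dict.ofList [(0, "1"), (1, "2"), (2, "2"), (3, "3"), (4, "3"), (5, "4"),
                     (6, "5"), (7, "5"), (8, "6"), (9, "6"), (10, "7"), (11, "7")]

def midi_to_reg_deg_py_alt (n : Int) : String × String :=
  let reg := if n < 60 then "L" else if n ≤ 71 then "M" else "H"
  (reg, (pvDegTable.get? (PySem.Int.mod n 12)).getD "1")  -- _DEG[n % 12]; key always present (0 ≤ n%12 < 12)

-- ===== PRECONDITION & SPEC =====
def Spec_midi_to_reg_deg_py (n : Int) (out : String × String) : Prop := out = midi_to_reg_deg_py_alt n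
instance (n : Int) (out : String × String) : Decidable (Spec_midi_to_reg_deg_py n out) := by unfold Spec_midi_to_reg_deg_py; infer_instance

-- ===== CLAIM (what is proved, stated in full; the proofs are below) =====
def Claim_equal_midi_to_reg_deg_py : Prop := ∀ (n : Int), Dom_midi_to_reg_deg_py n → Spec_midi_to_reg_deg_py n (midi_to_reg_deg_py n)

-- ===== LEMMAS AND PROOFS =====

-- both degree pipelines agree on every pitch class 0..11
lemma deg_eq (pc : Int) (h0 : 0 ≤ pc) (h1 : pc < 12) :
    pvWhiteMap.getD (if ¬ pvWhiteMap.contains pc then pvFindWhite [1, -1, 2, -2] pc else pc) "1"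
      = (pvDegTable.get? pc).getD "1" := by
  interval_cases pc <;> decide

-- ===== VERDICT (by name: the statement is the Claim_ definition above) =====
theorem midi_to_reg_deg_py_spec : Claim_equal_midi_to_reg_deg_py := by
  intro n _
  unfold Spec_midi_to_reg_deg_py midi_to_reg_deg_py midi_to_reg_deg_py_alt
  have h0 : 0 ≤ PySem.Int.mod n 12 := PySem.Int.mod_nonneg n (by norm_num)
  have h1 : PySem.Int.mod n 12 < 12 := PySem.Int.mod_lt n (by norm_num)
  simp only []
  exact congrArg _ (deg_eq _ h0 h1)
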